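-- pv_equiv track=rewrite | github.com/beephaha/pp2-22B030328 | tsis3/functions1/ex7.py | has_33
-- ===== SOURCE A (Python) =====
-- def has_33(nums):
--     is_true = "false"
--     for i in range(len(nums)):
--         if nums[i] == 3:
--             for t in range(i + 1,len(nums)):
--                 if nums[t] == 3:
--                     is_true = "true"
--                     break
--                 else:
--                     break
--     return is_true
-- ===== SOURCE B (Python) =====
-- def has_33(nums):
--     pos = [i for i, x in enumerate(nums) if x == 3]
--     found = any(b - a == 1 for a, b in zip(pos, pos[1:]))
--     return "true" if found else "false"
-- ===== Notes on version B (the rewrite author's own statement) =====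
-- stated objective: simpler
-- what changed: Replaces A's nested index loops (outer scan with a degenerate inner break-loop) by a two-phase pass: collect the indices of 3s, then check whether any two consecutive collected indices are adjacent.
import Mathlib
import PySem

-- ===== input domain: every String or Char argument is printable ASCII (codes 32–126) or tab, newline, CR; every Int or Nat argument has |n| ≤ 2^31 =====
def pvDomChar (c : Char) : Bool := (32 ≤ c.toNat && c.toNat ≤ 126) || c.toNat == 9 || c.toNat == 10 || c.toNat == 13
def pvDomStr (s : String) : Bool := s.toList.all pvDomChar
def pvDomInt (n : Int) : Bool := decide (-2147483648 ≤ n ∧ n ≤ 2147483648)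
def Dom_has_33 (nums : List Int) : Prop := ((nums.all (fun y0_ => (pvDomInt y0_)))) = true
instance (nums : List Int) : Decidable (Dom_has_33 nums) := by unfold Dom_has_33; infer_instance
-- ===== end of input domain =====

-- B replaces A's nested index loops by a two-phase pass — collect the positions of 3s, then scan
-- adjacent collected positions — a simpler decomposition of the same check (no speed claim).

-- ===== PORT A =====
-- inner 'for t in range(i+1, len(nums))': both branches break, so only the first t is examined;
-- the match on the head of the range list transcribes exactly that loop-with-break.
def hasInnerA (nums : List Int) (s : String) : List Int → String
  | [] => s
  | t :: _ => if PySem.List.pyGetD nums t 0 = 3 then "true" else s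

def has_33 (nums : List Int) : String :=
  (PySem.List.pyRange 0 (nums.length : Int) 1).foldl
    (fun s i =>
      if PySem.List.pyGetD nums i 0 = 3 then
        hasInnerA nums s (PySem.List.pyRange (i + 1) (nums.length : Int) 1)
      else s) "false"

-- ===== PORT B =====
def has_33_alt (nums : List Int) : String :=
  let pos := ((PySem.List.enumerate nums 0).filter (fun p => decide (p.2 = 3))).map (·.1)
  let found := (pos.zip (PySem.List.slice pos (some 1) none)).any (fun p => decide (p.2 - p.1 = 1))
  if found then "true" else "false"

-- ===== PRECONDITION & SPEC =====
def Spec_has_33 (nums : List Int) (out : String) : Prop := out = has_33_alt nums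
instance (nums : List Int) (out : String) : Decidable (Spec_has_33 nums out) := by unfold Spec_has_33; infer_instance

-- ===== CLAIM (what is proved, stated in full; the proofs are below) =====
def Claim_equal_has_33 : Prop := ∀ (nums : List Int), Dom_has_33 nums → Spec_has_33 nums (has_33 nums)

-- ===== LEMMAS AND PROOFS =====

-- reference predicate: the list contains two consecutive 3s
def adjB : List Int → Bool
  | [] => false
  | [_] => false
  | a :: b :: t => (decide (a = 3) && decide (b = 3)) || adjB (b :: t)

-- positions (from offset k) of the elements equal to 3
def posF (k : Int) (l : List Int) : List Int :=
  ((PySem.List.enumerate l k).filter (fun p => decide (p.2 = 3))).map (·.1)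

theorem posF_nil (k : Int) : posF k [] = [] := by
  simp [posF, PySem.List.enumerate_nil]

theorem posF_cons (k : Int) (x : Int) (t : List Int) :
    posF k (x :: t) = if x = 3 then k :: posF (k + 1) t else posF (k + 1) t := by
  by_cases h : x = 3 <;> simp [posF, PySem.List.enumerate_cons, h]

theorem posF_lb (l : List Int) : ∀ (k m : Int), m ∈ posF k l → k ≤ m := by
  induction l with
  | nil => intro k m hm; simp [posF_nil] at hm
  | cons x t ih =>
    intro k m hm
    rw [posF_cons] at hm
    by_cases h : x = 3
    · simp [h] at hm
      rcases hm with rfl | hm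
      · exact le_refl _
      · have := ih (k + 1) m hm; omega
    · simp [h] at hm
      have := ih (k + 1) m hm; omega

-- the zip-adjacent scan over collected positions equals the reference predicate
theorem posF_any_adj (l : List Int) : ∀ (k : Int),
    ((posF k l).zip ((posF k l).tail)).any (fun p => decide (p.2 - p.1 = 1)) = adjB l := by
  induction l with
  | nil => intro k; simp [posF_nil, adjB]
  | cons x t ih =>
    intro k
    rw [posF_cons]
    by_cases hx : x = 3
    · simp only [if_pos hx]
      cases t with
      | nil => simp [posF_nil, adjB]
      | cons b t' =>
        have hr := ih (k + 1)
        rw [posF_cons] at hr ⊢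
        by_cases hb : b = 3
        · simp only [if_pos hb] at hr ⊢
          subst hx hb
          simp only [List.tail_cons, List.zip_cons_cons, List.any_cons] at hr ⊢
          simp [adjB, ← hr]
        · simp only [if_neg hb] at hr ⊢
          cases hpos : posF (k + 1 + 1) t' with
          | nil =>
            rw [hpos] at hr
            simp only [List.tail_cons, List.zip_nil_right, List.any_nil] at hr ⊢
            simp [adjB, hx, hb, ← hr]
          | cons m r =>
            rw [hpos] at hr
            have hm : k + 1 + 1 ≤ m := posF_lb t' (k + 1 + 1) m (by rw [hpos]; simp)
            simp only [List.tail_cons, List.zip_cons_cons, List.any_cons] at hr ⊢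
            have hne : (decide (m - k = 1)) = false := by
              simp only [decide_eq_false_iff_not]
              omega
            simp [adjB, hx, hb, hne, ← hr]
    · simp only [if_neg hx]
      rw [ih (k + 1)]
      cases t with
      | nil => simp [adjB]
      | cons b t' => simp [adjB, hx]

-- index characterisation of adjB
theorem adjB_iff (l : List Int) :
    adjB l = true ↔ ∃ j : Nat, j + 1 < l.length ∧ l.getD j 0 = 3 ∧ l.getD (j + 1) 0 = 3 := by
  induction l with
  | nil => simp [adjB]
  | cons a t ih =>
    cases t with
    | nil =>
      rw [show adjB [a] = false from rfl]
      simp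
    | cons b t' =>
      constructor
      · intro h
        simp only [adjB, Bool.or_eq_true, Bool.and_eq_true, decide_eq_true_eq] at h
        rcases h with ⟨ha, hb⟩ | h
        · exact ⟨0, by simp, by simp [ha], by simp [hb]⟩
        · rcases (ih.mp h) with ⟨j, hj, h1, h2⟩
          exact ⟨j + 1, by simp at hj ⊢; omega, by simpa using h1, by simpa using h2⟩
      · rintro ⟨j, hj, h1, h2⟩
        simp only [adjB, Bool.or_eq_true, Bool.and_eq_true, decide_eq_true_eq]
        cases j with
        | zero => left; exact ⟨by simpa using h1, by simpa using h2⟩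
        | succ j' =>
          right
          exact ih.mpr ⟨j', by simp at hj ⊢; omega, by simpa using h1, by simpa using h2⟩

-- the inner loop of A looks only at index i+1
theorem hasInnerA_range (nums : List Int) (s : String) (i : Int) :
    hasInnerA nums s (PySem.List.pyRange (i + 1) (nums.length : Int) 1) =
      if i + 1 < (nums.length : Int) ∧ PySem.List.pyGetD nums (i + 1) 0 = 3 then "true" else s := by
  by_cases h : i + 1 < (nums.length : Int)
  · rw [PySem.List.pyRange_one_cons h]
    by_cases h3 : PySem.List.pyGetD nums (i + 1) 0 = 3
    · simp [hasInnerA, h, h3]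
    · simp [hasInnerA, h, h3]
  · rw [PySem.List.pyRange_one_eq_nil (by omega)]
    simp [hasInnerA, h]

-- a fold that only ever sets the flag to a constant
theorem foldl_set_const (p : Int → Bool) (c : String) (l : List Int) : ∀ (init : String),
    l.foldl (fun s i => if p i then c else s) init = if l.any p then c else init := by
  induction l with
  | nil => intro init; simp
  | cons x t ih =>
    intro init
    simp only [List.foldl_cons, List.any_cons, ih]
    by_cases hx : p x = true <;> by_cases ht : t.any p = true <;> simp [hx, ht]

theorem has_33_eq_adjB (nums : List Int) :
    has_33 nums = if adjB nums then "true" else "false" := by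
  unfold has_33
  have hstep : ∀ (s : String) (i : Int),
      (if PySem.List.pyGetD nums i 0 = 3 then
        hasInnerA nums s (PySem.List.pyRange (i + 1) (nums.length : Int) 1)
      else s) =
      (if (decide (PySem.List.pyGetD nums i 0 = 3) &&
           decide (i + 1 < (nums.length : Int)) &&
           decide (PySem.List.pyGetD nums (i + 1) 0 = 3)) then "true" else s) := by
    intro s i
    rw [hasInnerA_range]
    by_cases h1 : PySem.List.pyGetD nums i 0 = 3 <;>
      by_cases h2 : i + 1 < (nums.length : Int) <;>
        by_cases h3 : PySem.List.pyGetD nums (i + 1) 0 = 3 <;>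
          simp [h1, h2, h3]
  calc (PySem.List.pyRange 0 (nums.length : Int) 1).foldl
        (fun s i =>
          if PySem.List.pyGetD nums i 0 = 3 then
            hasInnerA nums s (PySem.List.pyRange (i + 1) (nums.length : Int) 1)
          else s) "false"
      = (PySem.List.pyRange 0 (nums.length : Int) 1).foldl
        (fun s i =>
          if (decide (PySem.List.pyGetD nums i 0 = 3) &&
              decide (i + 1 < (nums.length : Int)) &&
              decide (PySem.List.pyGetD nums (i + 1) 0 = 3)) then "true" else s) "false" := by
        have hfun :
            (fun (s : String) (i : Int) =>
              if PySem.List.pyGetD nums i 0 = 3 then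
                hasInnerA nums s (PySem.List.pyRange (i + 1) (nums.length : Int) 1)
              else s) =
            (fun (s : String) (i : Int) =>
              if (decide (PySem.List.pyGetD nums i 0 = 3) &&
                  decide (i + 1 < (nums.length : Int)) &&
                  decide (PySem.List.pyGetD nums (i + 1) 0 = 3)) then "true" else s) := by
          funext s i
          exact hstep s i
        rw [hfun]
    _ = if adjB nums then "true" else "false" := by
        rw [foldl_set_const]
        have hany : (PySem.List.pyRange 0 (nums.length : Int) 1).any
            (fun i => decide (PySem.List.pyGetD nums i 0 = 3) &&
              decide (i + 1 < (nums.length : Int)) &&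
              decide (PySem.List.pyGetD nums (i + 1) 0 = 3)) = adjB nums := by
          rw [Bool.eq_iff_iff, adjB_iff]
          simp only [List.any_eq_true, PySem.List.mem_pyRange_one, Bool.and_eq_true,
            decide_eq_true_eq]
          constructor
          · rintro ⟨i, ⟨hi0, _⟩, ⟨h1, h2⟩, h3⟩
            refine ⟨i.toNat, by omega, ?_, ?_⟩
            · have := PySem.List.pyGetD_eq_getElem (xs := nums) (i := i) (d := 0) hi0 (by omega)
              rw [this] at h1
              rw [List.getD_eq_getElem _ _ (by omega)]
              exact h1
            · have := PySem.List.pyGetD_eq_getElem (xs := nums) (i := i + 1) (d := 0) (by omega) h2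
              rw [this] at h3
              rw [List.getD_eq_getElem _ _ (by omega)]
              have ht : (i + 1).toNat = i.toNat + 1 := by omega
              simp only [ht] at h3
              exact h3
          · rintro ⟨j, hj, h1, h2⟩
            refine ⟨(j : Int), ⟨by omega, by omega⟩, ⟨?_, by omega⟩, ?_⟩
            · rw [PySem.List.pyGetD_natCast]
              exact h1
            · have : ((j : Int) + 1) = ((j + 1 : Nat) : Int) := by push_cast; ring
              rw [this, PySem.List.pyGetD_natCast]
              exact h2

        rw [hany]

theorem has_33_alt_eq_adjB (nums : List Int) :
    has_33_alt nums = if adjB nums then "true" else "false" := by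
  unfold has_33_alt
  have h := posF_any_adj nums 0
  unfold posF at h
  simp only [PySem.List.slice_from_one, h]

-- ===== VERDICT (by name: the statement is the Claim_ definition above) =====
theorem has_33_spec : Claim_equal_has_33 := by
  intro nums _
  unfold Spec_has_33
  rw [has_33_eq_adjB, has_33_alt_eq_adjB]
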